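-- pv_equiv track=rewrite | github.com/ballinyouup/morgan-ai-sdk | AI/utils/conversation_manager.py | _find_agreement_areas
-- ===== SOURCE A (Python) =====
-- from typing import Dict, Any, List, Optional
--
-- def _find_agreement_areas(
--
--     doc_turns: List[Dict],
--     sherlock_turns: List[Dict]
-- ) -> List[str]:
--     """Identify areas where both agents agree."""
--     agreements = []
--
--     # Simple keyword matching for demonstration
--     # In production, use semantic similarity
--     common_themes = [
--         "evidence", "timeline", "damages", "liability",
--         "settlement", "strategy", "risk"
--     ]
--
--     for theme in common_themes:
--         doc_mentions = sum(1 for t in doc_turns if theme in t['message'].lower())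
--         sherlock_mentions = sum(1 for t in sherlock_turns if theme in t['message'].lower())
--
--         if doc_mentions > 0 and sherlock_mentions > 0:
--             agreements.append(f"Both agents emphasize {theme}")
--
--     return agreements[:5]
-- ===== SOURCE B (Python) =====
-- def _find_agreement_areas(doc_turns, sherlock_turns):
--     """Identify areas where both agents agree."""
--     common_themes = [
--         "evidence", "timeline", "damages", "liability",
--         "settlement", "strategy", "risk"
--     ]
--
--     def present_themes(turns):
--         # one pass over the turns: lowercase each message once and collect
--         # the themes occurring in it into a set
--         present = set()
--         for t in turns:
--             msg = t['message'].lower()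
--             for theme in common_themes:
--                 if theme in msg:
--                     present.add(theme)
--         return present
--
--     doc_present = present_themes(doc_turns)
--     sherlock_present = present_themes(sherlock_turns)
--
--     agreements = [f"Both agents emphasize {theme}"
--                   for theme in common_themes
--                   if theme in doc_present and theme in sherlock_present]
--     return agreements[:5]
-- ===== Notes on version B (the rewrite author's own statement) =====
-- stated objective: faster
-- what changed: Instead of rescanning both turn lists once per theme (lowercasing every message 7 times), B makes one pass over each turn list, lowercases each message once and collects the themes present into two sets, then emits agreements by a single walk over the theme list.
import Mathlib
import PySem

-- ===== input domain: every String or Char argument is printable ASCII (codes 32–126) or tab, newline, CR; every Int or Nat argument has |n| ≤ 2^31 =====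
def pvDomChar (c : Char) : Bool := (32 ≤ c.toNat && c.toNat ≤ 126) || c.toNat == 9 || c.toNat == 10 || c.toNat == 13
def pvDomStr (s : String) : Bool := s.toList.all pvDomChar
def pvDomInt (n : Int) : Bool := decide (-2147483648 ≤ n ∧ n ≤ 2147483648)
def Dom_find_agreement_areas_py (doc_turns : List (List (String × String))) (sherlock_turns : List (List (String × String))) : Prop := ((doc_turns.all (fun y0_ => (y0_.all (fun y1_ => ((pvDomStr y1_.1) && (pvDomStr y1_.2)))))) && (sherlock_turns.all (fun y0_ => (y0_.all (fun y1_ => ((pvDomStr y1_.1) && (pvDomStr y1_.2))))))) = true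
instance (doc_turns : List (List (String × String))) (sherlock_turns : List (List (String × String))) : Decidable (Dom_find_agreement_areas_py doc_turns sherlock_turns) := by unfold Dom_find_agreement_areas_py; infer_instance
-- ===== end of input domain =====

-- B replaces A's per-theme rescans of both turn lists (which lowercase every message once per theme)
-- by a single pass over each turn list that lowercases each message once and collects the present themes into a set.


-- ===== PORT A =====
-- the fixed common_themes literal, shared verbatim by both Pythons
def pvThemes : List String :=
  ["evidence", "timeline", "damages", "liability", "settlement", "strategy", "risk"]

-- t['message'].lower(); Pre_ guarantees the key is present, so getD's default is never used inside Pre_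
def pvMsg (t : List (String × String)) : String :=
  PySem.Str.lower ((PySem.Dict.mk t).getD "message" "")

def find_agreement_areas_py (doc_turns : List (List (String × String))) (sherlock_turns : List (List (String × String))) : List String :=
  let agreements :=
    pvThemes.foldl (fun agreements theme =>
      let doc_mentions : Int :=
        doc_turns.foldl (fun acc t => if PySem.Str.isIn theme (pvMsg t) then acc + 1 else acc) 0
      let sherlock_mentions : Int :=
        sherlock_turns.foldl (fun acc t => if PySem.Str.isIn theme (pvMsg t) then acc + 1 else acc) 0
      if decide (0 < doc_mentions) && decide (0 < sherlock_mentions) then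
        agreements ++ ["Both agents emphasize " ++ theme]
      else agreements) []
  PySem.List.slice agreements none (some 5)

-- ===== PORT B =====
def pvPresentThemes (turns : List (List (String × String))) : PySem.Set String :=
  turns.foldl (fun present t =>
    let msg := pvMsg t
    pvThemes.foldl (fun present theme =>
      if PySem.Str.isIn theme msg then PySem.Set.add present theme else present) present)
    PySem.Set.empty

def find_agreement_areas_py_alt (doc_turns : List (List (String × String))) (sherlock_turns : List (List (String × String))) : List String :=
  let doc_present := pvPresentThemes doc_turns
  let sherlock_present := pvPresentThemes sherlock_turns
  ((pvThemes.filter (fun theme =>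
      PySem.Set.contains doc_present theme && PySem.Set.contains sherlock_present theme)).map
    (fun theme => "Both agents emphasize " ++ theme)).take 5

-- ===== PRECONDITION & SPEC =====
-- Pre_ excludes exactly the inputs where A raises KeyError: a turn without a 'message' key.
def Pre_find_agreement_areas_py (doc_turns : List (List (String × String))) (sherlock_turns : List (List (String × String))) : Prop :=
  (doc_turns.all (fun t => (PySem.Dict.mk t).contains "message")
    && sherlock_turns.all (fun t => (PySem.Dict.mk t).contains "message")) = true
instance (doc_turns : List (List (String × String))) (sherlock_turns : List (List (String × String))) : Decidable (Pre_find_agreement_areas_py doc_turns sherlock_turns) := by unfold Pre_find_agreement_areas_py; infer_instance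

def pvWitness_find_agreement_areas_py : (List (List (String × String))) × (List (List (String × String))) :=
  ([[("message", "We have Evidence and risk")]], [[("message", "the risk is clear")], [("speaker", "s"), ("message", "timeline")]])

def Spec_find_agreement_areas_py (doc_turns : List (List (String × String))) (sherlock_turns : List (List (String × String))) (out : List String) : Prop := out = find_agreement_areas_py_alt doc_turns sherlock_turns
instance (doc_turns : List (List (String × String))) (sherlock_turns : List (List (String × String))) (out : List String) : Decidable (Spec_find_agreement_areas_py doc_turns sherlock_turns out) := by unfold Spec_find_agreement_areas_py; infer_instance

-- ===== CLAIM (what is proved, stated in full; the proofs are below) =====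
def Claim_equal_find_agreement_areas_py : Prop := ∀ (doc_turns : List (List (String × String))) (sherlock_turns : List (List (String × String))), Dom_find_agreement_areas_py doc_turns sherlock_turns → Pre_find_agreement_areas_py doc_turns sherlock_turns → Spec_find_agreement_areas_py doc_turns sherlock_turns (find_agreement_areas_py doc_turns sherlock_turns)

-- ===== LEMMAS AND PROOFS =====

-- membership in the inner fold over the theme list
theorem mem_inner_fold (msg : String) (themes : List String) (s : PySem.Set String) (x : String) :
    x ∈ themes.foldl (fun present theme =>
      if PySem.Str.isIn theme msg then PySem.Set.add present theme else present) s ↔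
    x ∈ s ∨ (x ∈ themes ∧ PySem.Str.isIn x msg = true) := by
  induction themes generalizing s with
  | nil => simp
  | cons th rest ih =>
    simp only [List.foldl_cons, ih, List.mem_cons]
    by_cases h : PySem.Str.isIn th msg = true
    · simp only [if_pos h, PySem.Set.mem_add]
      constructor
      · rintro (⟨hs | rfl⟩ | ⟨hm, hi⟩)
        exacts [Or.inl hs, Or.inr ⟨Or.inl rfl, h⟩, Or.inr ⟨Or.inr hm, hi⟩]
      · rintro (hs | ⟨rfl | hm, hi⟩)
        exacts [Or.inl (Or.inl hs), Or.inl (Or.inr rfl), Or.inr ⟨hm, hi⟩]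
    · simp only [if_neg h]
      constructor
      · rintro (hs | ⟨hm, hi⟩)
        exacts [Or.inl hs, Or.inr ⟨Or.inr hm, hi⟩]
      · rintro (hs | ⟨rfl | hm, hi⟩)
        exacts [Or.inl hs, absurd hi h, Or.inr ⟨hm, hi⟩]

theorem mem_present_fold (turns : List (List (String × String))) (s : PySem.Set String) (x : String) :
    x ∈ turns.foldl (fun present t =>
      pvThemes.foldl (fun present theme =>
        if PySem.Str.isIn theme (pvMsg t) then PySem.Set.add present theme else present) present) s ↔
    x ∈ s ∨ (x ∈ pvThemes ∧ ∃ t ∈ turns, PySem.Str.isIn x (pvMsg t) = true) := by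
  induction turns generalizing s with
  | nil => simp
  | cons t rest ih =>
    simp only [List.foldl_cons, ih, mem_inner_fold]
    constructor
    · rintro ((hs | ⟨hth, hin⟩) | ⟨hth, u, hu, hin⟩)
      · exact Or.inl hs
      · exact Or.inr ⟨hth, t, List.mem_cons_self .., hin⟩
      · exact Or.inr ⟨hth, u, List.mem_cons_of_mem _ hu, hin⟩
    · rintro (hs | ⟨hth, u, hu, hin⟩)
      · exact Or.inl (Or.inl hs)
      · rcases List.mem_cons.1 hu with rfl | hu
        · exact Or.inl (Or.inr ⟨hth, hin⟩)
        · exact Or.inr ⟨hth, u, hu, hin⟩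

theorem mem_pvPresentThemes (turns : List (List (String × String))) (x : String) :
    x ∈ pvPresentThemes turns ↔ x ∈ pvThemes ∧ ∃ t ∈ turns, PySem.Str.isIn x (pvMsg t) = true := by
  unfold pvPresentThemes
  rw [mem_present_fold]
  simp [PySem.Set.empty]

theorem count_fold_pos (turns : List (List (String × String))) (theme : String) :
    (0 < turns.foldl (fun acc t => if PySem.Str.isIn theme (pvMsg t) then acc + 1 else acc) (0 : Int)) ↔
    ∃ t ∈ turns, PySem.Str.isIn theme (pvMsg t) = true := by
  rw [PySem.List.foldl_if_add_one]
  rw [show ∀ p, (turns.countP p : Int) = ((turns.countP p : Nat) : Int) from fun _ => rfl]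
  simp only [zero_add]
  rw [Int.natCast_pos, List.countP_pos_iff]

-- ===== VERDICT (by name: the statement is the Claim_ definition above) =====
set_option maxHeartbeats 1000000 in
theorem find_agreement_areas_py_spec : Claim_equal_find_agreement_areas_py := by
  intro doc_turns sherlock_turns _ _
  unfold Spec_find_agreement_areas_py find_agreement_areas_py find_agreement_areas_py_alt
  simp only
  rw [PySem.List.foldl_append_if
        (p := fun theme =>
          decide (0 < doc_turns.foldl (fun acc t => if PySem.Str.isIn theme (pvMsg t) then acc + 1 else acc) (0 : Int))
          && decide (0 < sherlock_turns.foldl (fun acc t => if PySem.Str.isIn theme (pvMsg t) then acc + 1 else acc) (0 : Int)))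
        (f := fun theme => "Both agents emphasize " ++ theme)]
  rw [show (5:Int) = ((5:Nat):Int) from rfl, PySem.List.slice_to_natCast]
  simp only [List.nil_append]
  refine congrArg (List.take 5) (congrArg _ (List.filter_congr ?_))
  intro theme hmem
  rw [Bool.eq_iff_iff]
  simp only [Bool.and_eq_true, decide_eq_true_eq, PySem.Set.contains_iff,
    mem_pvPresentThemes, count_fold_pos]
  tauto
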